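-- pv_equiv track=rewrite | github.com/tlgs/dailyprogrammer | Python/hard/h390.py | f
-- ===== SOURCE A (Python) =====
-- import math
--
-- def f(n):
--     total = 0
--     for i in range(0, int(math.log10(n)) + 1):
--         e = 10 ** i
--
--         digit = (n // e) % 10
--         prefix = n // (e * 10)
--
--         if digit == 0:
--             total += prefix * e
--         elif digit == 1:
--             total += prefix * e + (n % e) + 1
--         else:
--             total += (prefix + 1) * e
--
--     return total
-- ===== SOURCE B (Python) =====
-- def count_ones(m):
--     c = 0
--     while m > 0:
--         if m % 10 == 1:
--             c += 1
--         m //= 10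
--     return c
--
--
-- def f(n):
--     # g(m) = number of digit-1 occurrences in 1..m, by peeling the last digit:
--     # units place contributes q + (1 if d >= 1), and the higher digits of
--     # 1..m are the digits of 0..q, each full value repeated 10 times plus a
--     # partial block of d+1 copies of q's digits.
--     def g(m):
--         if m <= 0:
--             return 0
--         q, d = divmod(m, 10)
--         return q + (1 if d >= 1 else 0) + 10 * g(q - 1) + (d + 1) * count_ones(q)
--
--     return g(n)
-- ===== Notes on version B (the rewrite author's own statement) =====
-- stated objective: alternative
-- what changed: Replaces the digit-position loop (prefix/digit/suffix term per power of ten) with a recursion on the number itself: peel the last digit with divmod and combine the units-place count with ten-fold blocks of the higher digits, plus a digit-sum helper.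
import Mathlib
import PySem

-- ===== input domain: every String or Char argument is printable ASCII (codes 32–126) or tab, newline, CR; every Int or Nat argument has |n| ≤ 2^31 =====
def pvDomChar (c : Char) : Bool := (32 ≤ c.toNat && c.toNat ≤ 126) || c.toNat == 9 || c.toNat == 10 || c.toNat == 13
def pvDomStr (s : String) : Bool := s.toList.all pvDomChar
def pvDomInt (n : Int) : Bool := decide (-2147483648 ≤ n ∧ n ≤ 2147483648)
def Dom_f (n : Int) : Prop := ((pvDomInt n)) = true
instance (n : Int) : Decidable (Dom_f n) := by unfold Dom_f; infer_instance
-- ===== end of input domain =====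

-- B replaces A's digit-position formula by a recursion that peels the last digit: units-place count plus ten-fold blocks of the higher digits.

-- ===== PORT A =====
-- int(math.log10(n)) is ported as Nat.log 10 n.toNat: exact for 1 ≤ n ≤ 2^31 (the double log10 is
-- correctly rounded far within that range); for n ≤ 0 Python raises ValueError, excluded by Pre_f.
def f (n : Int) : Int :=
  (PySem.List.pyRange 0 ((Nat.log 10 n.toNat : Int) + 1) 1).foldl
    (fun total i =>
      let e : Int := 10 ^ i.toNat   -- 10 ** i, i ≥ 0 in the range
      let digit := PySem.Int.mod (PySem.Int.floordiv n e) 10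
      let prefix_ := PySem.Int.floordiv n (e * 10)
      if digit = 0 then total + prefix_ * e
      else if digit = 1 then total + (prefix_ * e + PySem.Int.mod n e + 1)
      else total + (prefix_ + 1) * e) 0

-- ===== PORT B =====
-- while m > 0: … m //= 10   (Source B's count_ones)
def countOnes (m : Int) : Int :=
  if h : 0 < m then
    (if PySem.Int.mod m 10 = 1 then 1 else 0) + countOnes (PySem.Int.floordiv m 10)
  else 0
termination_by m.toNat
decreasing_by
  simp only [PySem.Int.floordiv_eq_ediv_of_pos (by norm_num : (0:Int) < 10)]
  omega

-- Source B's inner g: q, d = divmod(m, 10)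
def gB (m : Int) : Int :=
  if h : m ≤ 0 then 0
  else
    let q := PySem.Int.floordiv m 10
    let d := PySem.Int.mod m 10
    q + (if 1 ≤ d then 1 else 0) + 10 * gB (q - 1) + (d + 1) * countOnes q
termination_by m.toNat
decreasing_by
  simp only [PySem.Int.floordiv_eq_ediv_of_pos (by norm_num : (0:Int) < 10)]
  omega

def f_alt (n : Int) : Int := gB n

-- ===== PRECONDITION & SPEC =====
-- Pre_f excludes exactly the inputs n ≤ 0 on which A raises ValueError (math.log10 domain error).
def Pre_f (n : Int) : Prop := 1 ≤ n
instance (n : Int) : Decidable (Pre_f n) := by unfold Pre_f; infer_instance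
def pvWitness_f : Int := 13

def Spec_f (n : Int) (out : Int) : Prop := out = f_alt n
instance (n : Int) (out : Int) : Decidable (Spec_f n out) := by unfold Spec_f; infer_instance

-- ===== CLAIM (what is proved, stated in full; the proofs are below) =====
def Claim_equal_f : Prop := ∀ (n : Int), Dom_f n → Pre_f n → Spec_f n (f n)

-- ===== LEMMAS AND PROOFS =====

/-- The value A's loop body adds at position `i` (divisions in ediv/emod form, valid for `0 ≤ x`). -/
def tTerm (i : Nat) (x : Int) : Int :=
  if x / 10 ^ i % 10 = 0 then x / (10 ^ i * 10) * 10 ^ i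
  else if x / 10 ^ i % 10 = 1 then x / (10 ^ i * 10) * 10 ^ i + x % 10 ^ i + 1
  else (x / (10 ^ i * 10) + 1) * 10 ^ i

/-- Indicator: digit `i` of `x` equals 1. -/
def ind (i : Nat) (x : Int) : Int := if x / 10 ^ i % 10 = 1 then 1 else 0

/-- B's running total after processing 1..M. -/
def G : Nat → Int
  | 0 => 0
  | m + 1 => G m + countOnes (m + 1)

theorem foldA (x : Int) (K : Nat) (c : Int) :
    (PySem.List.pyRange 0 (K : Int) 1).foldl
      (fun total i =>
        let e : Int := 10 ^ i.toNat
        let digit := PySem.Int.mod (PySem.Int.floordiv x e) 10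
        let prefix_ := PySem.Int.floordiv x (e * 10)
        if digit = 0 then total + prefix_ * e
        else if digit = 1 then total + (prefix_ * e + PySem.Int.mod x e + 1)
        else total + (prefix_ + 1) * e) c
      = c + ∑ i ∈ Finset.range K, tTerm i x := by
  induction K generalizing c with
  | zero => simp [PySem.List.pyRange_one_eq_nil]
  | succ k ih =>
      have h1 : (0 : Int) ≤ (k : Int) := by positivity
      have : ((k + 1 : Nat) : Int) = (k : Int) + 1 := by push_cast; ring
      rw [this, PySem.List.pyRange_one_succ_right h1, List.foldl_append, ih,
        Finset.sum_range_succ]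
      have he : (0 : Int) < 10 ^ k := by positivity
      have he10 : (0 : Int) < 10 ^ k * 10 := by positivity
      simp only [List.foldl_cons, List.foldl_nil, Int.toNat_natCast,
        PySem.Int.floordiv_eq_ediv_of_pos he, PySem.Int.floordiv_eq_ediv_of_pos he10,
        PySem.Int.mod_eq_emod_of_pos (by norm_num : (0:Int) < 10),
        PySem.Int.mod_eq_emod_of_pos he, tTerm]
      split_ifs <;> ring

theorem tTerm_zero_of_lt (i : Nat) (x : Int) (h0 : 0 ≤ x) (h : x < 10 ^ i) :
    tTerm i x = 0 := by
  have h1 : x / 10 ^ i = 0 := Int.ediv_eq_zero_of_lt h0 h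
  have h2 : x / (10 ^ i * 10) = 0 := by
    refine Int.ediv_eq_zero_of_lt h0 (lt_of_lt_of_le h ?_)
    nlinarith [pow_pos (by norm_num : (0:Int) < 10) i]
  simp [tTerm, h1, h2]

theorem ind_zero (i : Nat) : ind i 0 = 0 := by simp [ind]

theorem tTerm_succ (i : Nat) (hi : i < 10) (m : Int) :
    tTerm i (m + 1) = tTerm i m + ind i (m + 1) := by
  interval_cases i <;> (simp only [tTerm, ind]; norm_num; split_ifs <;> omega)

theorem countOnes_eq (k : Nat) (x : Int) (h0 : 0 ≤ x) (hx : x < 10 ^ k) :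
    countOnes x = ∑ i ∈ Finset.range k, ind i x := by
  induction k generalizing x with
  | zero =>
      have h1 : x < 1 := by simpa using hx
      have hx0 : x = 0 := by omega
      subst hx0
      rw [countOnes]; simp
  | succ k ih =>
      by_cases hpos : 0 < x
      · rw [countOnes]
        simp only [hpos, dif_pos]
        have h10 : (0 : Int) < 10 := by norm_num
        rw [PySem.Int.mod_eq_emod_of_pos h10, PySem.Int.floordiv_eq_ediv_of_pos h10]
        have hd0 : 0 ≤ x / 10 := Int.ediv_nonneg h0 (by norm_num)
        have hdk : x / 10 < 10 ^ k := by
          rw [Int.ediv_lt_iff_lt_mul (by norm_num)]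
          calc x < 10 ^ (k + 1) := hx
            _ = 10 ^ k * 10 := by ring
        rw [ih (x / 10) hd0 hdk, Finset.sum_range_succ']
        have hshift : ∀ i : Nat, ind i (x / 10) = ind (i + 1) x := by
          intro i
          simp only [ind, Int.ediv_ediv_of_nonneg (by norm_num : (0:Int) ≤ 10)]
          rw [show (10 : Int) * 10 ^ i = 10 ^ (i + 1) by ring]
        simp only [hshift]
        have : ind 0 x = if x % 10 = 1 then 1 else 0 := by simp [ind]
        rw [this]; ring
      · have hx0 : x = 0 := le_antisymm (by omega) h0
        subst hx0
        rw [countOnes]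
        simp [ind_zero]

theorem sum_tTerm_zero : ∑ i ∈ Finset.range 10, tTerm i (0 : Int) = 0 :=
  Finset.sum_eq_zero fun i _ => tTerm_zero_of_lt i 0 le_rfl (by positivity)

theorem sum_tTerm_eq_G (M : Nat) (hM : M < 10 ^ 10) :
    ∑ i ∈ Finset.range 10, tTerm i (M : Int) = G M := by
  induction M with
  | zero => simpa using sum_tTerm_zero
  | succ m ih =>
      have hm' : m < 10 ^ 10 := Nat.lt_of_succ_lt hM
      have hcast : ((m + 1 : Nat) : Int) = (m : Int) + 1 := by push_cast; ring
      have hstep : ∑ i ∈ Finset.range 10, tTerm i ((m : Int) + 1)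
          = ∑ i ∈ Finset.range 10, (tTerm i (m : Int) + ind i ((m : Int) + 1)) := by
        refine Finset.sum_congr rfl fun i hi => ?_
        exact tTerm_succ i (Finset.mem_range.mp hi) (m : Int)
      have hones : countOnes ((m : Int) + 1) = ∑ i ∈ Finset.range 10, ind i ((m : Int) + 1) := by
        refine countOnes_eq 10 _ (by positivity) ?_
        have : ((m : Int) + 1) = ((m + 1 : Nat) : Int) := by push_cast; ring
        rw [this]
        exact_mod_cast Int.ofNat_lt.mpr hM
      rw [hcast, hstep, Finset.sum_add_distrib, ih hm', G, hones]

theorem countOnes_zero : countOnes 0 = 0 := by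
  rw [countOnes]; norm_num

theorem countOnes_succ (x : Int) (hx : 0 < x) :
    countOnes x = (if x % 10 = 1 then 1 else 0) + countOnes (x / 10) := by
  rw [countOnes]
  simp only [hx, dif_pos,
    PySem.Int.mod_eq_emod_of_pos (by norm_num : (0:Int) < 10),
    PySem.Int.floordiv_eq_ediv_of_pos (by norm_num : (0:Int) < 10)]

theorem countOnes_one : countOnes 1 = 1 := by
  rw [countOnes_succ 1 (by norm_num)]
  norm_num [countOnes_zero]

theorem G_pred (q : Nat) : G q = G (q - 1) + countOnes (q : Int) := by
  cases q with
  | zero => simp [G, countOnes_zero]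
  | succ k => simp only [Nat.succ_sub_one]; rw [G]; norm_cast

/-- The block recurrence B's `g` implements, proved for the brute-force count `G`. -/
theorem G_closed (M : Nat) (hM : 1 ≤ M) :
    G M = ((M / 10 : Nat) : Int) + (if 1 ≤ M % 10 then (1:Int) else 0)
      + 10 * G (M / 10 - 1) + (((M % 10 : Nat) : Int) + 1) * countOnes ((M / 10 : Nat) : Int) := by
  induction M with
  | zero => omega
  | succ m ih =>
      rcases Nat.eq_zero_or_pos m with hm | hm
      · subst hm
        norm_num [G, countOnes_zero, countOnes_one]
      · have hG : G (m + 1) = G m + countOnes ((m : Int) + 1) := by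
          rw [G]
        have hco : countOnes ((m : Int) + 1)
            = (if ((m : Int) + 1) % 10 = 1 then 1 else 0) + countOnes (((m : Int) + 1) / 10) := by
          exact countOnes_succ _ (by positivity)
        have hcast1 : ((m : Int) + 1) % 10 = (((m + 1) % 10 : Nat) : Int) := by push_cast; ring_nf
        have hcast2 : ((m : Int) + 1) / 10 = (((m + 1) / 10 : Nat) : Int) := by push_cast; ring_nf
        rw [hG, ih hm, hco, hcast1, hcast2]
        obtain ⟨q, d, hmqd, hdlt⟩ : ∃ q d, m = 10 * q + d ∧ d < 10 :=
          ⟨m / 10, m % 10, by omega, by omega⟩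
        rw [show m / 10 = q from by omega, show m % 10 = d from by omega]
        by_cases hd9 : d = 9
        · subst hd9
          rw [show (m + 1) / 10 = q + 1 from by omega,
            show (m + 1) % 10 = 0 from by omega]
          have hGp : G q = G (q - 1) + countOnes ((q : Nat) : Int) := G_pred q
          rw [show q + 1 - 1 = q from by omega]
          norm_num
          push_cast at hGp
          linarith [hGp]
        · rw [show (m + 1) / 10 = q from by omega,
            show (m + 1) % 10 = d + 1 from by omega]
          by_cases hd0 : d = 0
          · subst hd0
            norm_num
            ring
          · rw [if_pos (by omega : 1 ≤ d), if_pos (by omega : 1 ≤ d + 1),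
              if_neg (by push_cast; omega : ¬ ((((d + 1) : Nat) : Int) = 1))]
            push_cast
            ring

theorem gB_eq_G (M : Nat) : gB (M : Int) = G M := by
  induction M using Nat.strong_induction_on with
  | _ M ih =>
      rcases Nat.eq_zero_or_pos M with h0 | h1
      · subst h0; rw [gB]; simp [G]
      · rw [gB]
        have hpos : ¬ ((M : Int) ≤ 0) := by omega
        simp only [hpos, dif_neg, not_false_iff,
          PySem.Int.floordiv_eq_ediv_of_pos (by norm_num : (0:Int) < 10),
          PySem.Int.mod_eq_emod_of_pos (by norm_num : (0:Int) < 10)]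
        have hq : (M : Int) / 10 = ((M / 10 : Nat) : Int) := by push_cast; ring_nf
        have hdc : (M : Int) % 10 = ((M % 10 : Nat) : Int) := by push_cast; ring_nf
        rw [hq, hdc, G_closed M h1]
        have hind : (if (1:Int) ≤ ((M % 10 : Nat) : Int) then (1:Int) else 0)
            = (if 1 ≤ M % 10 then (1:Int) else 0) := by
          by_cases h : 1 ≤ M % 10
          · rw [if_pos (by exact_mod_cast h), if_pos h]
          · rw [if_neg (by exact_mod_cast h), if_neg h]
        rw [hind]
        rcases Nat.eq_zero_or_pos (M / 10) with hq0 | hq1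
        · rw [hq0]
          rw [show ((0 : Nat) : Int) - 1 = -1 from by norm_num, gB]
          norm_num [G]
        · rw [show ((M / 10 : Nat) : Int) - 1 = ((M / 10 - 1 : Nat) : Int) from by omega,
            ih (M / 10 - 1) (by omega)]

-- ===== VERDICT (by name: the statement is the Claim_ definition above) =====
theorem f_spec : Claim_equal_f := by
  intro n hdom hpre
  unfold Spec_f
  have hn1 : 1 ≤ n := hpre
  have hn0 : 0 ≤ n := by omega
  have hbound : n ≤ 2147483648 := by
    have h := of_decide_eq_true hdom
    omega
  have hnat : n = ((n.toNat : Nat) : Int) := by omega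
  set K := Nat.log 10 n.toNat with hK
  -- A's fold is the sum of tTerm over range (K+1)
  have hA : f n = ∑ i ∈ Finset.range (K + 1), tTerm i n := by
    unfold f
    have : ((Nat.log 10 n.toNat : Int) + 1) = ((K + 1 : Nat) : Int) := by push_cast; ring
    rw [this, foldA n (K + 1) 0, zero_add]
  -- pad the sum out to 10 terms
  have hKlt : K + 1 ≤ 10 := by
    have hne : n.toNat ≠ 0 := by omega
    have hlt : n.toNat < 10 ^ 10 := by omega
    have := Nat.log_lt_of_lt_pow hne hlt
    omega
  have hnlt : n < 10 ^ (K + 1) := by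
    have := Nat.lt_pow_succ_log_self (by norm_num : 1 < 10) n.toNat
    rw [hnat]
    exact_mod_cast this
  have hpad : ∑ i ∈ Finset.range (K + 1), tTerm i n = ∑ i ∈ Finset.range 10, tTerm i n := by
    refine Finset.sum_subset (by intro x hx; simp only [Finset.mem_range] at hx ⊢; omega)
      fun i _ hi => ?_
    refine tTerm_zero_of_lt i n hn0 (lt_of_lt_of_le hnlt ?_)
    have hKi : K + 1 ≤ i := by
      by_contra h
      exact hi (Finset.mem_range.mpr (by omega))
    exact pow_le_pow_right₀ (by norm_num) hKi
  -- B's fold is G n.toNat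
  have hB : f_alt n = G n.toNat := by
    unfold f_alt
    conv_lhs => rw [hnat]
    exact gB_eq_G n.toNat
  rw [hA, hpad, hB, ← sum_tTerm_eq_G n.toNat (by omega), ← hnat]
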